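-- pv_equiv track=rewrite | github.com/shyam9411/Information-Retrival | 3-Inverted Index/Parser.py | remove_useless_text
-- ===== SOURCE A (Python) =====
-- INVALID_CHAR = '#'
--
-- def remove_useless_text(token_list):
--     # our punctuation list
--     useless_list = [',', '.', ':', ';', '?', '(', ')', '[', ']',
--                     '&', '!', '*', '@', '#', '$', '%', '"', '``',
--                     "''", "'", '–', '—', '’', '′', '，']
--     clean_token_list = []
--     for token_index in range(len(token_list)):
--         if token_index < len(token_list) - 2 and token_list[token_index] == '[' and \
--                     (token_list[token_index + 1] == 'edit' or token_list[token_index + 1].isdigit()) and \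
--                     token_list[token_index + 2] == ']':
--             token_list[token_index], token_list[token_index + 1], token_list[token_index + 2] = \
--                 INVALID_CHAR, INVALID_CHAR, INVALID_CHAR
--         elif token_list[token_index] in useless_list:
--             token_list[token_index] = INVALID_CHAR
--     for token in token_list:
--         if token != INVALID_CHAR:
--             clean_token_list.append(token)
--     return clean_token_list
-- ===== SOURCE B (Python) =====
-- INVALID_CHAR = '#'
--
-- # single left-to-right pass deciding each index from the ORIGINAL token values
-- PUNCT = (',', '.', ':', ';', '?', '(', ')', '[', ']',
--          '&', '!', '*', '@', '#', '$', '%', '"', '``',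
--          "''", "'", '–', '—', '’', '′', '，')
--
-- def remove_useless_text(token_list):
--     orig = list(token_list)
--     n = len(orig)
--     clean_token_list = []
--     for i, tok in enumerate(orig):
--         if tok in PUNCT or (
--                 (tok == 'edit' or tok.isdigit())
--                 and 1 <= i and i + 1 < n
--                 and orig[i - 1] == '[' and orig[i + 1] == ']'):
--             token_list[i] = INVALID_CHAR
--         else:
--             clean_token_list.append(tok)
--     return clean_token_list
-- ===== Notes on version B (the rewrite author's own statement) =====
-- stated objective: simpler
-- what changed: Replaces A's two passes (a destructive marking pass with lookahead over the mutating list, then a filter pass over the marked list) with one pass over a snapshot of the original values that decides each index directly via a lookbehind/lookahead test, appending kept tokens immediately.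
import Mathlib
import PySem

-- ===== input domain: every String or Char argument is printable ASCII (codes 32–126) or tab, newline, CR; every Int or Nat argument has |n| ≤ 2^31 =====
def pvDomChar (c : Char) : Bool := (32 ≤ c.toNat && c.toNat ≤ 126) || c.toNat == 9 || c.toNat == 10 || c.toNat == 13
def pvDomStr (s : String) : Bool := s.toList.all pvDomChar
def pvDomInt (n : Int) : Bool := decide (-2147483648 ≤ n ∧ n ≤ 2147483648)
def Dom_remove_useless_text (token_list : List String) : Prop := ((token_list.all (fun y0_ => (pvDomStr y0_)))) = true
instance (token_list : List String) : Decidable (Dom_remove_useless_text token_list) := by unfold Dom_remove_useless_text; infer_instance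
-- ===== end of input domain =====

-- B replaces A's two passes (destructive marking with lookahead, then filtering the marked list)
-- by one pass over a snapshot of the original values with a direct lookbehind/lookahead test (objective: simpler).
-- A mutates token_list in place (removed positions become '#'); B performs the same mutation in Python;
-- the Lean equivalence is about the RETURN value.

-- ===== PORT A =====
def pvUselessList : List String :=
  [",", ".", ":", ";", "?", "(", ")", "[", "]",
   "&", "!", "*", "@", "#", "$", "%", "\"", "``",
   "''", "'", "–", "—", "’", "′", "，"]

-- one iteration of A's marking loop (all indices read are in range, so List.getD is exact)
def pvMarkStep (tl : List String) (i : Nat) : List String :=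
  if i < tl.length - 2 ∧ tl.getD i "" = "[" ∧
      (tl.getD (i+1) "" = "edit" ∨ PySem.Str.strIsdigit (tl.getD (i+1) "") = true) ∧
      tl.getD (i+2) "" = "]" then
    ((tl.set i "#").set (i+1) "#").set (i+2) "#"
  else if tl.getD i "" ∈ pvUselessList then
    tl.set i "#"
  else tl

def remove_useless_text (token_list : List String) : List String :=
  let marked := (List.range token_list.length).foldl pvMarkStep token_list
  marked.foldl (fun acc t => if t ≠ "#" then acc ++ [t] else acc) []

-- ===== PORT B =====
def pvPunct : List String :=
  [",", ".", ":", ";", "?", "(", ")", "[", "]",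
   "&", "!", "*", "@", "#", "$", "%", "\"", "``",
   "''", "'", "–", "—", "’", "′", "，"]

def pvRemoveTok (orig : List String) (n i : Int) (tok : String) : Bool :=
  decide (tok ∈ pvPunct) ||
    ((decide (tok = "edit") || PySem.Str.strIsdigit tok) &&
     decide (1 ≤ i) && decide (i + 1 < n) &&
     decide (PySem.List.pyGetD orig (i - 1) "" = "[") &&
     decide (PySem.List.pyGetD orig (i + 1) "" = "]"))

def remove_useless_text_alt (token_list : List String) : List String :=
  let orig := token_list
  let n : Int := orig.length
  (PySem.List.enumerate orig).foldl
    (fun clean p => if pvRemoveTok orig n p.1 p.2 then clean else clean ++ [p.2]) []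

-- ===== PRECONDITION & SPEC =====
def Spec_remove_useless_text (token_list : List String) (out : List String) : Prop := out = remove_useless_text_alt token_list
instance (token_list : List String) (out : List String) : Decidable (Spec_remove_useless_text token_list out) := by unfold Spec_remove_useless_text; infer_instance

-- ===== CLAIM (what is proved, stated in full; the proofs are below) =====
def Claim_equal_remove_useless_text : Prop := ∀ (token_list : List String), Dom_remove_useless_text token_list → Spec_remove_useless_text token_list (remove_useless_text token_list)

-- ===== LEMMAS AND PROOFS =====

-- proof-side abbreviations
def pvG (l : List String) (j : Nat) : String := l.getD j ""
def pvP (s : String) : Bool := decide (s ∈ pvUselessList)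
def pvEd (s : String) : Bool := decide (s = "edit") || PySem.Str.strIsdigit s
-- "a pattern '[', edit/digit, ']' starts at j" (on the original values)
def pvPat (l : List String) (j : Nat) : Bool :=
  decide (j + 2 < l.length) && decide (pvG l j = "[") && pvEd (pvG l (j+1)) && decide (pvG l (j+2) = "]")
-- "index j has been marked '#' after the first k iterations of A's loop"
def pvS (l : List String) (k j : Nat) : Bool :=
  (decide (j < k) && pvP (pvG l j)) ||
  (decide (1 ≤ j) && decide (j - 1 < k) && pvPat l (j-1)) ||
  (decide (2 ≤ j) && decide (j - 2 < k) && pvPat l (j-2))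
-- the state of A's list after the first k iterations
lemma pvPunct_eq : pvPunct = pvUselessList := rfl

def pvMrk (l : List String) (k : Nat) : List String :=
  (List.range l.length).map (fun j => if pvS l k j then "#" else pvG l j)

lemma pvMap_range_getD (l : List String) :
    (List.range l.length).map (fun j => l.getD j "") = l := by
  apply List.ext_getElem
  · simp
  · intro i h1 h2
    simp [List.getD_eq_getElem?_getD, List.getElem?_eq_getElem h2]

lemma pvSet_map_range (n : Nat) (f : Nat → String) (k : Nat) (v : String) :
    ((List.range n).map f).set k v = (List.range n).map (fun j => if j = k then v else f j) := by
  apply List.ext_getElem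
  · simp
  · intro i h1 h2
    simp only [List.getElem_set, List.getElem_map, List.getElem_range]
    by_cases hik : i = k
    · subst hik; simp
    · rw [if_neg (fun h => hik h.symm), if_neg hik]

lemma pvGetD_map_range (n : Nat) (f : Nat → String) (i : Nat) :
    ((List.range n).map f).getD i "" = if i < n then f i else "" := by
  by_cases h : i < n
  · rw [List.getD_eq_getElem?_getD]
    simp only [List.getElem?_map, List.getElem?_range, h, if_pos, Option.map_some, Option.getD_some]
  · have hn : ((List.range n).map f)[i]? = none := by
      apply List.getElem?_eq_none; simp; omega
    rw [List.getD_eq_getElem?_getD, hn, if_neg h]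
    rfl

lemma pvEd_not_lb (s : String) (h : pvEd s = true) : s ≠ "[" := by
  intro he; subst he; simp [pvEd] at h; revert h; decide

lemma pvPat_not_succ (l : List String) (j : Nat) (h : pvPat l j = true) :
    pvPat l (j+1) = false := by
  simp only [pvPat, Bool.and_eq_true, decide_eq_true_eq] at h
  obtain ⟨⟨⟨h1, h2⟩, h3⟩, h4⟩ := h
  rw [Bool.eq_false_iff]
  intro hc
  simp only [pvPat, Bool.and_eq_true, decide_eq_true_eq] at hc
  obtain ⟨⟨⟨c1, c2⟩, c3⟩, c4⟩ := hc
  exact pvEd_not_lb _ h3 c2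
lemma pvPat_not_succ2 (l : List String) (j : Nat) (h : pvPat l j = true) :
    pvPat l (j+2) = false := by
  simp only [pvPat, Bool.and_eq_true, decide_eq_true_eq] at h
  obtain ⟨⟨⟨h1, h2⟩, h3⟩, h4⟩ := h
  rw [Bool.eq_false_iff]
  intro hc
  simp only [pvPat, Bool.and_eq_true, decide_eq_true_eq] at hc
  obtain ⟨⟨⟨c1, c2⟩, c3⟩, c4⟩ := hc
  rw [h4] at c2
  exact absurd c2 (by decide)

-- pvS grows monotonically with k
lemma pvS_mono (l : List String) (k j : Nat) (h : pvS l k j = true) : pvS l (k+1) j = true := by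
  simp only [pvS, Bool.or_eq_true, Bool.and_eq_true, decide_eq_true_eq] at h ⊢
  rcases h with (⟨h1, h2⟩ | ⟨⟨a, b⟩, c⟩) | ⟨⟨a, b⟩, c⟩
  · exact Or.inl (Or.inl ⟨by omega, h2⟩)
  · exact Or.inl (Or.inr ⟨⟨a, by omega⟩, c⟩)
  · exact Or.inr ⟨⟨a, by omega⟩, c⟩

-- what iteration k can newly mark: k itself, or k+1/k+2 when a pattern starts at k
lemma pvS_sub (l : List String) (k j : Nat) (h : pvS l (k+1) j = true) :
    pvS l k j = true ∨ j = k ∨ ((j = k+1 ∨ j = k+2) ∧ pvPat l k = true) := by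
  simp only [pvS, Bool.or_eq_true, Bool.and_eq_true, decide_eq_true_eq] at h ⊢
  rcases h with (⟨h1, h2⟩ | ⟨⟨a, b⟩, c⟩) | ⟨⟨a, b⟩, c⟩
  · by_cases e : j = k
    · exact Or.inr (Or.inl e)
    · exact Or.inl (Or.inl (Or.inl ⟨by omega, h2⟩))
  · by_cases e : j = k + 1
    · refine Or.inr (Or.inr ⟨Or.inl e, ?_⟩)
      rwa [show j - 1 = k from by omega] at c
    · exact Or.inl (Or.inl (Or.inr ⟨⟨a, by omega⟩, c⟩))
  · by_cases e : j = k + 2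
    · refine Or.inr (Or.inr ⟨Or.inr e, ?_⟩)
      rwa [show j - 2 = k from by omega] at c
    · exact Or.inl (Or.inr ⟨⟨a, by omega⟩, c⟩)

lemma pvS_succ_eq (l : List String) (k j : Nat) (hPk : pvPat l k = false) (hj : j ≠ k) :
    pvS l (k+1) j = pvS l k j := by
  cases hb : pvS l (k+1) j
  · cases ha : pvS l k j
    · rfl
    · rw [pvS_mono l k j ha] at hb; exact hb.symm
  · rcases pvS_sub l k j hb with h | h | ⟨h, hp⟩
    · exact h.symm
    · exact absurd h hj
    · rw [hp] at hPk; exact absurd hPk (by simp)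

lemma pvS_succ_eq' (l : List String) (k j : Nat) (hj : j ≠ k) (hj1 : j ≠ k+1) (hj2 : j ≠ k+2) :
    pvS l (k+1) j = pvS l k j := by
  cases hb : pvS l (k+1) j
  · cases ha : pvS l k j
    · rfl
    · rw [pvS_mono l k j ha] at hb; exact hb.symm
  · rcases pvS_sub l k j hb with h | h | ⟨h, hp⟩
    · exact h.symm
    · exact absurd h hj
    · rcases h with h | h
      · exact absurd h hj1
      · exact absurd h hj2

lemma pvS_succ_self_of_P (l : List String) (k : Nat) (h : pvP (pvG l k) = true) :
    pvS l (k+1) k = true := by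
  simp only [pvS, Bool.or_eq_true, Bool.and_eq_true, decide_eq_true_eq]
  exact Or.inl (Or.inl ⟨by omega, h⟩)

lemma pvS_succ_pat0 (l : List String) (k : Nat) (h : pvPat l k = true) :
    pvS l (k+1) k = true := by
  apply pvS_succ_self_of_P
  simp only [pvPat, Bool.and_eq_true, decide_eq_true_eq] at h
  rw [pvP, h.1.1.2]; decide

lemma pvS_succ_pat1 (l : List String) (k : Nat) (h : pvPat l k = true) :
    pvS l (k+1) (k+1) = true := by
  simp only [pvS, Bool.or_eq_true, Bool.and_eq_true, decide_eq_true_eq]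
  refine Or.inl (Or.inr ⟨⟨by omega, by omega⟩, ?_⟩)
  rwa [show k + 1 - 1 = k from by omega]

lemma pvS_succ_pat2 (l : List String) (k : Nat) (h : pvPat l k = true) :
    pvS l (k+1) (k+2) = true := by
  simp only [pvS, Bool.or_eq_true, Bool.and_eq_true, decide_eq_true_eq]
  refine Or.inr ⟨⟨by omega, by omega⟩, ?_⟩
  rwa [show k + 2 - 2 = k from by omega]

lemma pvS_succ_self_false (l : List String) (k : Nat) (hS : pvS l k k = false)
    (hP : pvP (pvG l k) = false) : pvS l (k+1) k = false := by
  rw [Bool.eq_false_iff] at hS ⊢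
  intro h
  apply hS
  simp only [pvS, Bool.or_eq_true, Bool.and_eq_true, decide_eq_true_eq] at h ⊢
  rcases h with (⟨h1, h2⟩ | ⟨⟨a, b⟩, c⟩) | ⟨⟨a, b⟩, c⟩
  · rw [h2] at hP; exact absurd hP (by simp)
  · exact Or.inl (Or.inr ⟨⟨a, by omega⟩, c⟩)
  · exact Or.inr ⟨⟨a, by omega⟩, c⟩

-- if k is not yet marked, k+1 is not yet marked either
lemma pvS_k1_false (l : List String) (k : Nat) (hS : pvS l k k = false) :
    pvS l k (k+1) = false := by
  rw [Bool.eq_false_iff] at hS ⊢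
  intro h
  apply hS
  simp only [pvS, Bool.or_eq_true, Bool.and_eq_true, decide_eq_true_eq] at h ⊢
  rcases h with (⟨h1, h2⟩ | ⟨⟨a, b⟩, c⟩) | ⟨⟨a, b⟩, c⟩
  · omega
  · omega
  · have h2 : 1 ≤ k := by omega
    refine Or.inl (Or.inr ⟨⟨h2, by omega⟩, ?_⟩)
    rwa [show k + 1 - 2 = k - 1 from by omega] at c

lemma pvS_k2_false (l : List String) (k : Nat) : pvS l k (k+2) = false := by
  rw [Bool.eq_false_iff]
  intro h
  simp only [pvS, Bool.or_eq_true, Bool.and_eq_true, decide_eq_true_eq] at h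
  rcases h with (⟨h1, h2⟩ | ⟨⟨a, b⟩, c⟩) | ⟨⟨a, b⟩, c⟩ <;> omega

lemma pvPat_self_false (l : List String) (k : Nat) (hS : pvS l k k = true) :
    pvPat l k = false := by
  simp only [pvS, Bool.or_eq_true, Bool.and_eq_true, decide_eq_true_eq] at hS
  rcases hS with (⟨h1, h2⟩ | ⟨⟨a, b⟩, c⟩) | ⟨⟨a, b⟩, c⟩
  · omega
  · have := pvPat_not_succ l (k-1) c
    rwa [show k - 1 + 1 = k from by omega] at this
  · have := pvPat_not_succ2 l (k-2) c
    rwa [show k - 2 + 2 = k from by omega] at this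

-- one step of A's loop advances the marked-state description
lemma pvStep_eq (l : List String) (k : Nat) (hk : k < l.length) :
    pvMarkStep (pvMrk l k) k = pvMrk l (k+1) := by
  have hget : ∀ i, (pvMrk l k).getD i "" =
      if i < l.length then (if pvS l k i then "#" else pvG l i) else "" :=
    fun i => pvGetD_map_range l.length _ i
  by_cases hS : pvS l k k = true
  · -- k was already marked '#': the pattern branch cannot fire, the elif re-marks '#'
    have hgk : (pvMrk l k).getD k "" = "#" := by rw [hget]; simp [hk, hS]
    rw [pvMarkStep, if_neg (by rintro ⟨-, c2, -⟩; rw [hgk] at c2; exact absurd c2 (by decide)),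
        if_pos (by rw [hgk]; decide)]
    unfold pvMrk
    rw [pvSet_map_range]
    apply List.map_congr_left
    intro j hj
    by_cases hjk : j = k
    · subst hjk
      rw [if_pos rfl, if_pos (pvS_mono l j j hS)]
    · rw [if_neg hjk, pvS_succ_eq l k j (pvPat_self_false l k hS) hjk]
  · -- k is still its original value
    replace hS : pvS l k k = false := by revert hS; cases pvS l k k <;> simp
    have hgk : (pvMrk l k).getD k "" = pvG l k := by rw [hget]; simp [hk, hS]
    have hgk1 : (pvMrk l k).getD (k+1) "" = if k + 1 < l.length then pvG l (k+1) else "" := by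
      rw [hget, pvS_k1_false l k hS]
      simp
    have hgk2 : (pvMrk l k).getD (k+2) "" = if k + 2 < l.length then pvG l (k+2) else "" := by
      rw [hget, pvS_k2_false l k]
      simp
    have hlen : (pvMrk l k).length = l.length := by simp [pvMrk]
    by_cases hPat : pvPat l k = true
    · -- the pattern fires: mark k, k+1, k+2
      have hp := hPat
      simp only [pvPat, Bool.and_eq_true, decide_eq_true_eq] at hp
      obtain ⟨⟨⟨p1, p2⟩, p3⟩, p4⟩ := hp
      have hcond : k < (pvMrk l k).length - 2 ∧ (pvMrk l k).getD k "" = "[" ∧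
          ((pvMrk l k).getD (k+1) "" = "edit" ∨ PySem.Str.strIsdigit ((pvMrk l k).getD (k+1) "") = true) ∧
          (pvMrk l k).getD (k+2) "" = "]" := by
        refine ⟨by rw [hlen]; omega, by rw [hgk]; exact p2, ?_, by rw [hgk2, if_pos p1]; exact p4⟩
        rw [hgk1, if_pos (by omega)]
        simp only [pvEd, Bool.or_eq_true, decide_eq_true_eq] at p3
        exact p3
      rw [pvMarkStep, if_pos hcond]
      unfold pvMrk
      rw [pvSet_map_range, pvSet_map_range, pvSet_map_range]
      apply List.map_congr_left
      intro j hj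
      by_cases h2 : j = k + 2
      · subst h2; rw [if_pos rfl, if_pos (pvS_succ_pat2 l k hPat)]
      by_cases h1 : j = k + 1
      · subst h1; rw [if_neg h2, if_pos rfl, if_pos (pvS_succ_pat1 l k hPat)]
      by_cases h0 : j = k
      · rw [if_neg h2, if_neg h1, if_pos h0, h0, pvS_succ_pat0 l k hPat]; simp
      · rw [if_neg h2, if_neg h1, if_neg h0, pvS_succ_eq' l k j h0 h1 h2]
    · replace hPat : pvPat l k = false := by revert hPat; cases pvPat l k <;> simp
      have hnc : ¬(k < (pvMrk l k).length - 2 ∧ (pvMrk l k).getD k "" = "[" ∧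
          ((pvMrk l k).getD (k+1) "" = "edit" ∨ PySem.Str.strIsdigit ((pvMrk l k).getD (k+1) "") = true) ∧
          (pvMrk l k).getD (k+2) "" = "]") := by
        rintro ⟨c1, c2, c3, c4⟩
        rw [hlen] at c1
        rw [Bool.eq_false_iff] at hPat
        apply hPat
        simp only [pvPat, Bool.and_eq_true, decide_eq_true_eq]
        rw [hgk] at c2
        rw [hgk1, if_pos (by omega)] at c3
        rw [hgk2, if_pos (by omega)] at c4
        exact ⟨⟨⟨by omega, c2⟩, by simp only [pvEd, Bool.or_eq_true, decide_eq_true_eq]; exact c3⟩, c4⟩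
      rw [pvMarkStep, if_neg hnc]
      by_cases hP : pvP (pvG l k) = true
      · rw [if_pos (by rw [hgk]; exact of_decide_eq_true hP)]
        unfold pvMrk
        rw [pvSet_map_range]
        apply List.map_congr_left
        intro j hj
        by_cases hjk : j = k
        · subst hjk; rw [if_pos rfl, if_pos (pvS_succ_self_of_P l j hP)]
        · rw [if_neg hjk, pvS_succ_eq l k j hPat hjk]
      · replace hP : pvP (pvG l k) = false := by revert hP; cases pvP (pvG l k) <;> simp
        rw [if_neg (by rw [hgk]; exact of_decide_eq_false hP)]
        unfold pvMrk
        apply List.map_congr_left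
        intro j hj
        by_cases hjk : j = k
        · rw [hjk, hS, pvS_succ_self_false l k hS hP]
        · rw [pvS_succ_eq l k j hPat hjk]

lemma pvLoop_eq (l : List String) (k : Nat) (hk : k ≤ l.length) :
    (List.range k).foldl pvMarkStep l = pvMrk l k := by
  induction k with
  | zero =>
    simp [pvMrk, pvS]
    exact (pvMap_range_getD l).symm
  | succ k ih =>
    rw [List.range_succ, List.foldl_append, ih (by omega), List.foldl_cons, List.foldl_nil]
    exact pvStep_eq l k (by omega)

-- an unmarked token is never '#'
lemma pvG_ne_hash (l : List String) (j : Nat) (hj : j < l.length)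
    (h : pvS l l.length j = false) : pvG l j ≠ "#" := by
  intro hc
  rw [Bool.eq_false_iff] at h
  apply h
  simp only [pvS, Bool.or_eq_true, Bool.and_eq_true, decide_eq_true_eq]
  refine Or.inl (Or.inl ⟨hj, ?_⟩)
  rw [pvP, hc]; decide

-- the final mark of index j coincides with B's removal predicate
lemma pvS_final (l : List String) (j : Nat) (hj : j < l.length) :
    pvRemoveTok l (l.length : Int) (j : Int) (pvG l j) = pvS l l.length j := by
  rw [Bool.eq_iff_iff]
  simp only [pvRemoveTok, pvS, pvPat, pvEd, pvP, pvPunct_eq, Bool.or_eq_true, Bool.and_eq_true,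
    decide_eq_true_eq]
  constructor
  · rintro (h | ⟨⟨⟨⟨hEd, h1⟩, h2⟩, h3⟩, h4⟩)
    · exact Or.inl (Or.inl ⟨hj, h⟩)
    · have hj1 : 1 ≤ j := by exact_mod_cast h1
      have hj2 : j + 1 < l.length := by
        have : ((j : Int) + 1) < (l.length : Int) := h2
        exact_mod_cast this
      rw [show ((j : Int) - 1) = ((j - 1 : Nat) : Int) from by omega,
          PySem.List.pyGetD_natCast] at h3
      rw [show ((j : Int) + 1) = ((j + 1 : Nat) : Int) from by omega,
          PySem.List.pyGetD_natCast] at h4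
      refine Or.inl (Or.inr ⟨⟨hj1, by omega⟩, ?_, ?_⟩)
      · refine ⟨⟨by omega, h3⟩, ?_⟩
        rw [show j - 1 + 1 = j from by omega]
        exact hEd
      · rw [show j - 1 + 2 = j + 1 from by omega]
        exact h4
  · rintro ((⟨-, hp⟩ | ⟨⟨h1, -⟩, ⟨⟨q1, q2⟩, q3⟩, q4⟩) | ⟨⟨h2, -⟩, -, q4⟩)
    · exact Or.inl hp
    · rw [show j - 1 + 1 = j from by omega] at q3
      rw [show j - 1 + 2 = j + 1 from by omega] at q4
      refine Or.inr ⟨⟨⟨⟨q3, by exact_mod_cast h1⟩, by exact_mod_cast (by omega : j + 1 < l.length)⟩, ?_⟩, ?_⟩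
      · rw [show ((j : Int) - 1) = ((j - 1 : Nat) : Int) from by omega,
            PySem.List.pyGetD_natCast]
        exact q2
      · rw [show ((j : Int) + 1) = ((j + 1 : Nat) : Int) from by omega,
            PySem.List.pyGetD_natCast]
        exact q4
    · rw [show j - 2 + 2 = j from by omega] at q4
      exact Or.inl (by rw [q4]; decide)

theorem remove_useless_text_spec : Claim_equal_remove_useless_text := by
  intro l _
  unfold Spec_remove_useless_text
  have hA : remove_useless_text l =
      ((List.range l.length).foldl pvMarkStep l).foldl
        (fun acc t => if t ≠ "#" then acc ++ [t] else acc) [] := rfl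
  have hB : remove_useless_text_alt l =
      (PySem.List.enumerate l).foldl
        (fun clean p => if pvRemoveTok l (l.length : Int) p.1 p.2 = true then clean
         else clean ++ [p.2]) [] := rfl
  rw [hA, hB, pvLoop_eq l l.length le_rfl]
  unfold pvMrk
  rw [List.foldl_map, PySem.List.enumerate_eq_map_pyRange (d := ""), List.foldl_map,
      PySem.List.pyRange_one, List.foldl_map]
  simp only [Int.sub_zero, zero_add]
  apply PySem.List.foldl_congr_mem
  intro acc j hjmem
  have hj : j < l.length := List.mem_range.mp hjmem
  rw [PySem.List.pyGetD_natCast, show l.getD j "" = pvG l j from rfl]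
  have hfin := pvS_final l j hj
  cases hS : pvS l l.length j
  · rw [hS] at hfin
    rw [hfin]
    simp [pvG_ne_hash l j hj hS]
  · rw [hS] at hfin
    rw [hfin]
    simp
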